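-- pv_equiv track=rewrite | github.com/Choeseonjeong/Baekjoon | 프로그래머스/1/135808. 과일 장수/과일 장수.py | solution
-- ===== SOURCE A (Python) =====
-- def solution(k, m, score):
--     answer=[]
--     result=0
--     arr = sorted(score,reverse=True)
--     for i in range(0,len(score),m):
--         answer.append(arr[i:i+m])
--
--     for i in answer:
--         if len(i)==m:
--             result+=i[-1]*m
--     return result
-- ===== SOURCE B (Python) =====
-- def solution(k, m, score):
--     # Sort ascending once; the minimum of each full descending m-chunk sits at
--     # indices len%m, len%m + m, ... in the ascending order, so sum those and scale by m.
--     arr = sorted(score)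
--     return m * sum(arr[i] for i in range(len(arr) % m, len(arr), m))
-- ===== Notes on version B (the rewrite author's own statement) =====
-- stated objective: alternative
-- what changed: B sorts ascending once and sums the elements at the closed-form positions len%m, len%m+m, ... of the group minima, instead of A's descending sort followed by materialising m-sized chunk lists and scanning them for their last elements.
import Mathlib
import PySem

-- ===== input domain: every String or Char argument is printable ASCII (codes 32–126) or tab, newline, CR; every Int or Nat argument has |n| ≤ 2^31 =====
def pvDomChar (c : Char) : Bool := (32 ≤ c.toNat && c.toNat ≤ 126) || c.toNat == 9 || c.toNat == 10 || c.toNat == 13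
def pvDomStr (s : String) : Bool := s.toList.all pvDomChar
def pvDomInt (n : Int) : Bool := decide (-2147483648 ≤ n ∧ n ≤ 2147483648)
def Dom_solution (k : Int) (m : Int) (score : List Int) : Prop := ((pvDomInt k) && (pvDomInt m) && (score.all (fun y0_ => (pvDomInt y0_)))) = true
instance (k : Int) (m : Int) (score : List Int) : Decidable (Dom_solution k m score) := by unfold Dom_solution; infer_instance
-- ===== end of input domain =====

-- B replaces A's descending sort + chunk-list construction by one ascending sort and a direct
-- stride over the closed-form positions of the group minima (alternative decomposition; no chunk lists).

-- ===== PORT A =====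
def solution (k : Int) (m : Int) (score : List Int) : Int :=
  let arr := PySem.List.sorted score (fun x => x) true
  let answer := (PySem.List.pyRange 0 (score.length : Int) m).foldl
      (fun acc i => acc ++ [PySem.List.slice arr (some i) (some (i + m))]) []
  answer.foldl (fun result chunk =>
      -- i[-1]: every chunk reached under the len == m guard is nonempty, so the getD 0 default is never used
      if (chunk.length : Int) = m then result + (PySem.List.pyGet? chunk (-1)).getD 0 * m
      else result) 0

-- ===== PORT B =====
def solution_alt (k : Int) (m : Int) (score : List Int) : Int :=
  let arr := PySem.List.sorted score (fun x => x) false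
  m * ((PySem.List.pyRange (PySem.Int.mod (score.length : Int) m) (score.length : Int) m).foldl
      -- arr[i]: every generated index is in range when m ≠ 0, so the getD 0 default is never used
      (fun acc i => acc + (PySem.List.pyGet? arr i).getD 0) 0)

-- ===== PRECONDITION & SPEC =====
-- Pre_ excludes only m = 0, where A raises ValueError (range step 0) and B raises ZeroDivisionError.
def Pre_solution (k : Int) (m : Int) (score : List Int) : Prop := m ≠ 0
instance (k : Int) (m : Int) (score : List Int) : Decidable (Pre_solution k m score) := by unfold Pre_solution; infer_instance
def pvWitness_solution : Int × Int × List Int := (4, 3, [4, 1, 3, 1, 2, 4, 1])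

def Spec_solution (k : Int) (m : Int) (score : List Int) (out : Int) : Prop := out = solution_alt k m score
instance (k : Int) (m : Int) (score : List Int) (out : Int) : Decidable (Spec_solution k m score out) := by unfold Spec_solution; infer_instance

-- ===== CLAIM (what is proved, stated in full; the proofs are below) =====
def Claim_equal_solution : Prop := ∀ (k : Int) (m : Int) (score : List Int), Dom_solution k m score → Pre_solution k m score → Spec_solution k m score (solution k m score)

-- ===== LEMMAS AND PROOFS =====

theorem pyRange_neg_empty (a b s : Int) (hs : s < 0) (hab : a ≤ b) :
    PySem.List.pyRange a b s = [] := by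
  simp only [PySem.List.pyRange]
  rw [if_neg (by omega : ¬ s = 0)]
  simp only [if_neg (by omega : ¬ (0:Int) < s), if_neg (by omega : ¬ b < a)]
  simp

theorem foldl_ite_add {α : Type} (l : List α) (p : α → Prop) [DecidablePred p]
    (v : α → Int) (a : Int) :
    l.foldl (fun r c => if p c then r + v c else r) a
      = a + (l.map (fun c => if p c then v c else 0)).sum := by
  induction l generalizing a with
  | nil => simp
  | cons x xs ih => by_cases h : p x <;> simp [h, ih] <;> ring

theorem sortedDesc_eq_reverse (xs : List Int) :
    PySem.List.sorted xs (fun x => x) true = (PySem.List.sorted xs (fun x => x) false).reverse := by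
  have h : (PySem.List.sorted xs (fun x => x) true).reverse
      = PySem.List.sorted xs (fun x => x) false := by
    apply PySem.List.eq_of_perm_of_pairwise_le_of_injective (fun x : Int => x) (fun _ _ h => h)
    · exact ((PySem.List.sorted xs (fun x => x) true).reverse_perm.trans
        (PySem.List.sorted_perm xs (fun x => x) true)).trans
        (PySem.List.sorted_perm xs (fun x => x) false).symm
    · exact List.pairwise_reverse.mpr
        (by simpa using PySem.List.sorted_pairwise_rev xs (fun x => x))
    · exact PySem.List.sorted_pairwise xs (fun x => x)
  rw [← h, List.reverse_reverse]

theorem sum_map_range_eq (n : Nat) (f : Nat → Int) :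
    ((List.range n).map f).sum = ∑ i ∈ Finset.range n, f i := rfl

theorem main_pos (kk : Int) (mn : Nat) (hmn : 0 < mn) (score : List Int) :
    solution kk (mn : Int) score = solution_alt kk (mn : Int) score := by
  unfold solution solution_alt
  simp only []
  set asc := PySem.List.sorted score (fun x => x) false with hasc
  set n := score.length with hn
  set g := n / mn with hg
  set r := n % mn with hr
  have hm : (0:Int) < (mn:Int) := by exact_mod_cast hmn
  have hD : asc.reverse.length = n := by
    simp [hasc, PySem.List.length_sorted, hn]
  -- A side: chunk fold -> sum over List.range
  rw [sortedDesc_eq_reverse, PySem.List.pyRange_of_pos _ _ hm,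
      PySem.List.foldl_append_singleton_eq_map, List.nil_append,
      List.foldl_map, List.foldl_map, foldl_ite_add, zero_add]
  -- B side: fold -> sum over List.range
  rw [PySem.Int.mod_natCast, PySem.List.pyRange_of_pos _ _ hm, List.foldl_map,
      PySem.List.foldl_add, zero_add]
  -- pointwise value of A's summand
  have hA : ∀ c : Nat,
      (if ((PySem.List.slice asc.reverse (some (0 + (mn:Int) * c)) (some (0 + (mn:Int) * c + mn))).length : Int) = (mn:Int)
        then (PySem.List.pyGet? (PySem.List.slice asc.reverse (some (0 + (mn:Int) * c)) (some (0 + (mn:Int) * c + mn))) (-1)).getD 0 * (mn:Int)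
        else 0)
      = (if c < g then asc.reverse.getD (mn * c + mn - 1) 0 * (mn:Int) else 0) := by
    intro c
    have hcast : (0 + (mn:Int) * c) = ((mn * c : Nat) : Int) := by push_cast; ring
    rw [hcast, PySem.List.slice_natCast_add]
    by_cases hfit : mn * c + mn ≤ n
    · have hlen : (List.take mn (List.drop (mn * c) asc.reverse)).length = mn := by
        simp [List.length_take, List.length_drop, hD]; omega
      have hc : c < g := by
        have he : (c + 1) * mn = mn * c + mn := by ring
        have h1 : (c + 1) * mn ≤ n := by omega
        exact Nat.lt_of_lt_of_le (Nat.lt_succ_self c) ((Nat.le_div_iff_mul_le hmn).mpr h1)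
      rw [hlen, if_pos rfl, if_pos hc, PySem.List.pyGet?_neg_one,
          List.getLast?_eq_getElem?, hlen, List.getElem?_take,
          if_pos (show mn - 1 < mn by omega), List.getElem?_drop,
          List.getD_eq_getElem?_getD]
      have hidx : mn * c + (mn - 1) = mn * c + mn - 1 := by omega
      rw [hidx]
    · have hlen : (List.take mn (List.drop (mn * c) asc.reverse)).length = n - mn * c := by
        simp [List.length_take, List.length_drop, hD]; omega
      have hc : ¬ c < g := by
        intro hc
        have h2 : (c + 1) * mn ≤ n := (Nat.le_div_iff_mul_le hmn).mp hc
        have he : (c + 1) * mn = mn * c + mn := by ring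
        omega
      rw [hlen, if_neg (by exact_mod_cast (by omega : ¬ (n - mn * c = mn))), if_neg hc]
  rw [List.map_congr_left (fun c _ => hA c)]
  rw [sum_map_range_eq, sum_map_range_eq]
  have hdm : n = mn * g + r := by
    rw [hg, hr]; exact (Nat.div_add_mod n mn).symm
  have hrn : r < mn := Nat.mod_lt _ hmn
  -- the number of chunks is at least the number g of full chunks
  have hcntA : g ≤ (if (0:Int) < (n:Int) then (((n:Int) - 0 + (mn:Int) - 1) / (mn:Int)).toNat else 0) := by
    by_cases hn0 : 0 < n
    · rw [if_pos (by exact_mod_cast hn0)]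
      have hc1 : ((n:Int) - 0 + (mn:Int) - 1) = (((n + mn - 1 : Nat)) : Int) := by push_cast; omega
      rw [hc1, ← Int.natCast_div, Int.toNat_natCast]
      exact Nat.div_le_div_right (by omega)
    · have hz : n = 0 := by omega
      simp [hg, hz]
  -- B generates exactly g indices
  have hcntB : (if ((r:Int)) < (n:Int) then (((n:Int) - (r:Int) + (mn:Int) - 1) / (mn:Int)).toNat else 0) = g := by
    by_cases h : r < n
    · rw [if_pos (by exact_mod_cast h)]
      have hc1 : ((n:Int) - (r:Int) + (mn:Int) - 1) = (((mn - 1 + mn * g : Nat)) : Int) := by push_cast; omega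
      rw [hc1, ← Int.natCast_div, Int.toNat_natCast, Nat.add_mul_div_left _ _ hmn,
          Nat.div_eq_of_lt (by omega)]
      omega
    · rw [if_neg (by exact_mod_cast h)]
      have := Nat.mod_le n mn
      exact (Nat.div_eq_of_lt (by omega)).symm
  rw [hcntB]
  obtain ⟨t, ht⟩ := Nat.exists_eq_add_of_le hcntA
  rw [ht, Finset.sum_range_add]
  have htail : ∑ i ∈ Finset.range t, (if g + i < g then asc.reverse.getD (mn * (g + i) + mn - 1) 0 * (mn:Int) else 0) = 0 :=
    Finset.sum_eq_zero (fun i _ => if_neg (by omega))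
  rw [htail, add_zero]
  rw [← Finset.sum_range_reflect (fun j => (PySem.List.pyGet? asc ((r:Int) + (mn:Int) * (j:Nat))).getD 0) g, Finset.mul_sum]
  apply Finset.sum_congr rfl
  intro j hj
  have hjg : j < g := Finset.mem_range.mp hj
  rw [if_pos hjg]
  have hmul : mn * (g - 1 - j) + mn * (j + 1) = mn * g := by
    rw [← Nat.mul_add]
    congr 1
    omega
  have he2 : mn * (j + 1) = mn * j + mn := by ring
  have hidx : ((r:Int) + (mn:Int) * ((g - 1 - j : Nat) : Int)) = (((r + mn * (g - 1 - j) : Nat)) : Int) := by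
    push_cast; ring
  rw [hidx, PySem.List.pyGet?_natCast]
  have hlt : r + mn * (g - 1 - j) < asc.reverse.reverse.length := by
    simp [hasc, PySem.List.length_sorted, ← hn]
    omega
  have h1 := List.getElem?_reverse (l := asc.reverse) (i := r + mn * (g - 1 - j)) (by simpa using hlt)
  rw [List.reverse_reverse] at h1
  rw [h1, List.getD_eq_getElem?_getD, List.length_reverse]
  have hidx2 : asc.length - 1 - (r + mn * (g - 1 - j)) = mn * j + mn - 1 := by
    have hlen3 : asc.length = n := by simp [hasc, PySem.List.length_sorted, ← hn]
    omega
  rw [hidx2, mul_comm]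

theorem solution_spec : Claim_equal_solution := by
  intro k m score _ hpre
  unfold Spec_solution
  rcases lt_trichotomy m 0 with hneg | hz | hpos
  · -- m < 0: both ranges are empty, both results are 0
    unfold solution solution_alt
    simp only []
    have hb : PySem.Int.mod (score.length : Int) m ≤ (score.length : Int) := by
      have := (PySem.Int.mod_neg_bounds (score.length : Int) hneg).2
      have : (0:Int) ≤ (score.length : Int) := Int.natCast_nonneg _
      omega
    rw [pyRange_neg_empty _ _ _ hneg (Int.natCast_nonneg _),
        pyRange_neg_empty _ _ _ hneg hb]
    simp
  · exact absurd hz hpre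
  · obtain ⟨mn, rfl⟩ : ∃ mn : Nat, (mn : Int) = m := ⟨m.toNat, Int.toNat_of_nonneg hpos.le⟩
    exact main_pos k mn (by exact_mod_cast hpos) score
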